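-- pv_equiv track=rewrite | github.com/DogNick/TFWorkshop | models/tools.py | remove_rep
-- ===== SOURCE A (Python) =====
-- PUNC = ['，', ',', '。', '.', '！', '!', '"', '?', '？']
--
-- def remove_rep(sent):
--     length = 4
--     while length > 1:
--         index = -1
--         for i in range(len(sent)-2*length+1):
--             if ''.join(sent[i:i+length]) == ''.join(sent[i+length:i+2*length]):
--                 index = i
--                 break
--         if index >= 0:
--             #print (length, index)
--             sent = sent[:i]+sent[i+length:]
--         else:
--             length -= 1
--     length = 6
--     while length > 0:
--         index = -1
--         for i in range(len(sent)-2*length):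
--             if (sent[i+length] in PUNC):
--                 if ''.join(sent[i:i+length]) == ''.join(sent[i+1+length:i+1+2*length]):
--                     index = i
--                     break
--         if index >= 0:
--             #print (length, index)
--             sent = sent[:i]+sent[i+length+1:]
--         else:
--             length -= 1
--     return sent
-- ===== SOURCE B (Python) =====
-- PUNC = ['，', ',', '。', '.', '！', '!', '"', '?', '？']
--
-- def remove_rep(sent):
--     # Single left-to-right pass per block length with an output stack: push each
--     # character and chop the stack whenever its suffix becomes a doubled block
--     # (or a block + punctuation + same block).  Equivalent to repeated leftmost
--     # removal because the stack is always free of complete repeat windows.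
--     def squash(s, L):
--         out = []
--         for ch in s:
--             out.append(ch)
--             if len(out) >= 2 * L and out[-2 * L:-L] == out[-L:]:
--                 del out[-L:]
--         return out
--
--     def squash_punc(s, L):
--         out = []
--         for ch in s:
--             out.append(ch)
--             if (len(out) >= 2 * L + 1 and out[-(L + 1)] in PUNC
--                     and out[-(2 * L + 1):-(L + 1)] == out[-L:]):
--                 del out[-(L + 1):]
--         return out
--
--     s = list(sent)
--     for L in (4, 3, 2):
--         s = squash(s, L)
--     for L in (6, 5, 4, 3, 2, 1):
--         s = squash_punc(s, L)
--     return ''.join(s)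
-- ===== Notes on version B (the rewrite author's own statement) =====
-- stated objective: faster
-- what changed: B replaces A's find-leftmost-then-restart-from-scratch loop by a single left-to-right pass per block length with an output stack: each character is pushed and the stack suffix is chopped whenever it becomes a doubled block (or block+punctuation+block); the stack is invariantly free of repeat windows, which makes this equal to A's repeated leftmost removal.
import Mathlib
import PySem

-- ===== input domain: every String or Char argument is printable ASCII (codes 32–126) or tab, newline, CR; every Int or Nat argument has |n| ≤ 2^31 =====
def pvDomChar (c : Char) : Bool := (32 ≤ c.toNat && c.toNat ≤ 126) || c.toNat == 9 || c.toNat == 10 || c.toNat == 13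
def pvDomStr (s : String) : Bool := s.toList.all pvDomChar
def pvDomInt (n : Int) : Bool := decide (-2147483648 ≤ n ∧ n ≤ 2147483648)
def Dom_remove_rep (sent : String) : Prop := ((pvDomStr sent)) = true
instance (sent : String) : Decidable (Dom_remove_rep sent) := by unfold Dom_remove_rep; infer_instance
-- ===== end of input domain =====

-- B replaces A's restart-from-0 leftmost-removal loops by one left-to-right stack pass
-- per block length (push each char, chop the stack suffix when it becomes a repeat window).

-- ===== PORT A =====
def pvPunc : List Char := ['，', ',', '。', '.', '！', '!', '"', '?', '？']

-- ''.join(sent[i:i+L]) == ''.join(sent[i+L:i+2L])  (Python slices clamp, as take/drop do)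
def blkEq (l : List Char) (i L : Nat) : Bool :=
  ((l.drop i).take L) == ((l.drop (i + L)).take L)

-- sent[i+L] in PUNC and ''.join(sent[i:i+L]) == ''.join(sent[i+1+L:i+1+2L])
def pncEq (l : List Char) (i L : Nat) : Bool :=
  (match l[i + L]? with
   | some c => pvPunc.contains c
   | none => false)
  && (((l.drop i).take L) == ((l.drop (i + L + 1)).take L))

-- A's inner 'for i in range(…): if cond: index=i; break' loop
def goA (p : Nat → Bool) : List Nat → Option Nat
  | [] => none
  | i :: rest => if p i then some i else goA p rest

def findRepA (l : List Char) (L : Nat) : Option Nat :=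
  goA (fun i => blkEq l i L) (List.range (l.length + 1 - 2 * L))

def findPncA (l : List Char) (L : Nat) : Option Nat :=
  goA (fun i => pncEq l i L) (List.range (l.length - 2 * L))

-- termination facts the ports' (and the proof helpers') recursions cite
theorem pv_removal_lt (l : List Char) (i L d : Nat) (hL : 0 < L) (h : i + L ≤ d)
    (hd : d ≤ l.length) : (l.take i ++ l.drop d).length < l.length := by
  simp; omega

theorem pv_pred_lt (L : Nat) (h : 0 < L) : L - 1 < L := Nat.sub_lt h Nat.one_pos

theorem goA_mem {p : Nat → Bool} : ∀ {xs : List Nat} {i : Nat}, goA p xs = some i → i ∈ xs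
  | [], _, h => by simp [goA] at h
  | j :: rest, i, h => by
      by_cases hp : p j
      · simp [goA, hp] at h; simp [h]
      · simp [goA, hp] at h; exact List.mem_cons_of_mem _ (goA_mem h)

theorem findRepA_bound {l : List Char} {L i : Nat} (h : findRepA l L = some i) :
    i + 2 * L ≤ l.length := by
  have := List.mem_range.mp (goA_mem h); omega

theorem findPncA_bound {l : List Char} {L i : Nat} (h : findPncA l L = some i) :
    i + 2 * L + 1 ≤ l.length := by
  have := List.mem_range.mp (goA_mem h); omega

-- A, phase 1: while length > 1 (length starts at 4)
def phase1A (l : List Char) (L : Nat) : List Char :=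
  if _h1 : 1 < L then
    match hf : findRepA l L with
    | some i => phase1A (l.take i ++ l.drop (i + L)) L
    | none => phase1A l (L - 1)
  else l
termination_by (L, l.length)
decreasing_by
  · exact Prod.Lex.right L (pv_removal_lt l i L (i + L) (by omega) (Nat.le_refl _)
      (le_trans (by omega) (findRepA_bound hf)))
  · exact Prod.Lex.left _ _ (pv_pred_lt L (by omega))

-- A, phase 2: while length > 0 (length starts at 6)
def phase2A (l : List Char) (L : Nat) : List Char :=
  if _h1 : 0 < L then
    match hf : findPncA l L with
    | some i => phase2A (l.take i ++ l.drop (i + L + 1)) L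
    | none => phase2A l (L - 1)
  else l
termination_by (L, l.length)
decreasing_by
  · exact Prod.Lex.right L (pv_removal_lt l i L (i + L + 1) (by omega) (by omega)
      (le_trans (by omega) (findPncA_bound hf)))
  · exact Prod.Lex.left _ _ (pv_pred_lt L _h1)

def remove_rep (sent : String) : String :=
  String.ofList (phase2A (phase1A sent.toList 4) 6)

-- ===== PORT B =====
-- push ch, then: if len(out) >= 2L and out[-2L:-L] == out[-L:]: del out[-L:]
def step1 (L : Nat) (out : List Char) (c : Char) : List Char :=
  let o := out ++ [c]
  if 2 * L ≤ o.length ∧ (o.drop (o.length - 2 * L)).take L = o.drop (o.length - L)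
  then o.take (o.length - L) else o

def squash1 (L : Nat) (s : List Char) : List Char := s.foldl (step1 L) []

-- push ch, then: if len(out) >= 2L+1 and out[-(L+1)] in PUNC
--                and out[-(2L+1):-(L+1)] == out[-L:]: del out[-(L+1):]
def step2 (L : Nat) (out : List Char) (c : Char) : List Char :=
  let o := out ++ [c]
  if 2 * L + 1 ≤ o.length ∧
     (match o[o.length - (L + 1)]? with
      | some p => pvPunc.contains p
      | none => false) = true ∧
     (o.drop (o.length - (2 * L + 1))).take L = o.drop (o.length - L)
  then o.take (o.length - (L + 1)) else o

def squash2 (L : Nat) (s : List Char) : List Char := s.foldl (step2 L) []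

def remove_rep_alt (sent : String) : String :=
  String.ofList (squash2 1 (squash2 2 (squash2 3 (squash2 4 (squash2 5 (squash2 6
    (squash1 2 (squash1 3 (squash1 4 sent.toList)))))))))

-- ===== PRECONDITION & SPEC =====
def Spec_remove_rep (sent : String) (out : String) : Prop := out = remove_rep_alt sent
instance (sent : String) (out : String) : Decidable (Spec_remove_rep sent out) := by unfold Spec_remove_rep; infer_instance

-- ===== CLAIM (what is proved, stated in full; the proofs are below) =====
def Claim_equal_remove_rep : Prop := ∀ (sent : String), Dom_remove_rep sent → Spec_remove_rep sent (remove_rep sent)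

-- ===== LEMMAS AND PROOFS =====

-- the fixpoint of A's removal at a single block length (proof-only helper)
def fix1 (L : Nat) (l : List Char) : List Char :=
  if h0 : 0 < L then
    match hf : findRepA l L with
    | some i => fix1 L (l.take i ++ l.drop (i + L))
    | none => l
  else l
termination_by l.length
decreasing_by
  exact pv_removal_lt l i L (i + L) h0 (Nat.le_refl _)
    (le_trans (by omega) (findRepA_bound hf))

def fix2 (L : Nat) (l : List Char) : List Char :=
  if h0 : 0 < L then
    match hf : findPncA l L with
    | some i => fix2 L (l.take i ++ l.drop (i + L + 1))
    | none => l
  else l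
termination_by l.length
decreasing_by
  exact pv_removal_lt l i L (i + L + 1) h0 (by omega)
    (le_trans (by omega) (findPncA_bound hf))

-- first-match characterisation of A's scan
theorem goA_range'_none (p : Nat → Bool) : ∀ (k s : Nat),
    (∀ j, s ≤ j → j < s + k → p j = false) → goA p (List.range' s k) = none
  | 0, s, _ => rfl
  | k + 1, s, h => by
      rw [List.range'_succ]
      unfold goA
      rw [if_neg (by simp [h s (Nat.le_refl s) (by omega)])]
      exact goA_range'_none p k (s + 1) (fun j h1 h2 => h j (by omega) (by omega))

theorem goA_range'_some (p : Nat → Bool) (i : Nat) : ∀ (k s : Nat), s ≤ i → i < s + k →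
    p i = true → (∀ j, s ≤ j → j < i → p j = false) → goA p (List.range' s k) = some i
  | 0, s, h1, h2, _, _ => by omega
  | k + 1, s, h1, h2, hp, hmin => by
      rw [List.range'_succ]
      unfold goA
      rcases Nat.eq_or_lt_of_le h1 with rfl | hlt
      · rw [if_pos hp]
      · rw [if_neg (by simp [hmin s (Nat.le_refl s) hlt])]
        exact goA_range'_some p i k (s + 1) hlt (by omega) hp
          (fun j ha hb => hmin j (by omega) hb)

theorem findRepA_none (L : Nat) (l : List Char)
    (h : ∀ i, i + 2 * L ≤ l.length → blkEq l i L = false) : findRepA l L = none := by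
  unfold findRepA
  rw [List.range_eq_range']
  exact goA_range'_none _ _ _ (fun j _ h2 => h j (by omega))

theorem findRepA_some (L : Nat) (l : List Char) (i : Nat) (hi : i + 2 * L ≤ l.length)
    (hp : blkEq l i L = true) (hmin : ∀ j, j < i → blkEq l j L = false) :
    findRepA l L = some i := by
  unfold findRepA
  rw [List.range_eq_range']
  exact goA_range'_some _ _ _ _ (Nat.zero_le _) (by omega) hp (fun j _ hb => hmin j hb)

theorem findPncA_none (L : Nat) (l : List Char)
    (h : ∀ i, i + 2 * L + 1 ≤ l.length → pncEq l i L = false) : findPncA l L = none := by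
  unfold findPncA
  rw [List.range_eq_range']
  exact goA_range'_none _ _ _ (fun j _ h2 => h j (by omega))

theorem findPncA_some (L : Nat) (l : List Char) (i : Nat) (hi : i + 2 * L + 1 ≤ l.length)
    (hp : pncEq l i L = true) (hmin : ∀ j, j < i → pncEq l j L = false) :
    findPncA l L = some i := by
  unfold findPncA
  rw [List.range_eq_range']
  exact goA_range'_some _ _ _ _ (Nat.zero_le _) (by omega) hp (fun j _ hb => hmin j hb)

-- the match conditions only look at the first i + window characters
theorem take_slice (l : List Char) (j L m : Nat) (h : j + L ≤ m) :
    ((l.take m).drop j).take L = (l.drop j).take L := by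
  rw [List.drop_take, List.take_take]; congr 1; omega

theorem blkEq_take (l : List Char) (j L m : Nat) (h : j + 2 * L ≤ m) :
    blkEq (l.take m) j L = blkEq l j L := by
  unfold blkEq
  rw [take_slice l j L m (by omega), take_slice l (j + L) L m (by omega)]

theorem pncEq_take (l : List Char) (j L m : Nat) (h : j + 2 * L + 1 ≤ m) :
    pncEq (l.take m) j L = pncEq l j L := by
  unfold pncEq
  rw [take_slice l j L m (by omega), take_slice l (j + L + 1) L m (by omega),
    List.getElem?_take_of_lt (by omega)]

theorem blkEq_append (out rest : List Char) (j L : Nat) (h : j + 2 * L ≤ out.length) :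
    blkEq (out ++ rest) j L = blkEq out j L := by
  have := blkEq_take (out ++ rest) j L out.length h
  rw [List.take_left] at this
  exact this.symm

theorem pncEq_append (out rest : List Char) (j L : Nat) (h : j + 2 * L + 1 ≤ out.length) :
    pncEq (out ++ rest) j L = pncEq out j L := by
  have := pncEq_take (out ++ rest) j L out.length h
  rw [List.take_left] at this
  exact this.symm

-- unfolding helpers for fix1/fix2 and the phases
theorem fix1_some {L : Nat} {l : List Char} {i : Nat} (h0 : 0 < L)
    (hf : findRepA l L = some i) : fix1 L l = fix1 L (l.take i ++ l.drop (i + L)) := by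
  rw [fix1.eq_def, dif_pos h0]; split <;> simp_all

theorem fix1_none {L : Nat} {l : List Char} (hf : findRepA l L = none) : fix1 L l = l := by
  rw [fix1.eq_def]; split
  · split <;> simp_all
  · rfl

theorem fix2_some {L : Nat} {l : List Char} {i : Nat} (h0 : 0 < L)
    (hf : findPncA l L = some i) : fix2 L l = fix2 L (l.take i ++ l.drop (i + L + 1)) := by
  rw [fix2.eq_def, dif_pos h0]; split <;> simp_all

theorem fix2_none {L : Nat} {l : List Char} (hf : findPncA l L = none) : fix2 L l = l := by
  rw [fix2.eq_def]; split
  · split <;> simp_all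
  · rfl

theorem phase1A_some {l : List Char} {L i : Nat} (h1 : 1 < L) (h : findRepA l L = some i) :
    phase1A l L = phase1A (l.take i ++ l.drop (i + L)) L := by
  rw [phase1A.eq_def, dif_pos h1]; split <;> simp_all

theorem phase1A_none {l : List Char} {L : Nat} (h1 : 1 < L) (h : findRepA l L = none) :
    phase1A l L = phase1A l (L - 1) := by
  rw [phase1A.eq_def, dif_pos h1]; split <;> simp_all

theorem phase2A_some {l : List Char} {L i : Nat} (h1 : 0 < L) (h : findPncA l L = some i) :
    phase2A l L = phase2A (l.take i ++ l.drop (i + L + 1)) L := by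
  rw [phase2A.eq_def, dif_pos h1]; split <;> simp_all

theorem phase2A_none {l : List Char} {L : Nat} (h1 : 0 < L) (h : findPncA l L = none) :
    phase2A l L = phase2A l (L - 1) := by
  rw [phase2A.eq_def, dif_pos h1]; split <;> simp_all

-- A's per-length while loop is: reach the fixpoint at L, then decrement
theorem phase1A_fix (L : Nat) (l : List Char) (hL : 1 < L) :
    phase1A l L = phase1A (fix1 L l) (L - 1) := by
  cases hf : findRepA l L with
  | some i =>
      rw [phase1A_some hL hf, fix1_some (by omega) hf]
      exact phase1A_fix L _ hL
  | none => rw [phase1A_none hL hf, fix1_none hf]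
termination_by l.length
decreasing_by
  exact pv_removal_lt l i L (i + L) (by omega) (Nat.le_refl _)
    (le_trans (by omega) (findRepA_bound hf))

theorem phase2A_fix (L : Nat) (l : List Char) (hL : 0 < L) :
    phase2A l L = phase2A (fix2 L l) (L - 1) := by
  cases hf : findPncA l L with
  | some i =>
      rw [phase2A_some hL hf, fix2_some hL hf]
      exact phase2A_fix L _ hL
  | none => rw [phase2A_none hL hf, fix2_none hf]
termination_by l.length
decreasing_by
  exact pv_removal_lt l i L (i + L + 1) hL (by omega)
    (le_trans (by omega) (findPncA_bound hf))

theorem phase1A_one (l : List Char) : phase1A l 1 = l := by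
  rw [phase1A.eq_def, dif_neg (by omega)]

theorem phase2A_zero (l : List Char) : phase2A l 0 = l := by
  rw [phase2A.eq_def, dif_neg (by omega)]

-- B's stack pass computes the same fixpoint: the stack never contains a repeat window
theorem sim1 (L : Nat) (hL : 0 < L) : ∀ (rest out : List Char),
    (∀ i, i + 2 * L ≤ out.length → blkEq out i L = false) →
    List.foldl (step1 L) out rest = fix1 L (out ++ rest)
  | [], out, h => by
      simpa using (fix1_none (findRepA_none L out h)).symm
  | c :: rest, out, h => by
      rw [List.foldl_cons]
      have hout : out ++ c :: rest = (out ++ [c]) ++ rest := by simp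
      by_cases hc : 2 * L ≤ (out ++ [c]).length ∧
          ((out ++ [c]).drop ((out ++ [c]).length - 2 * L)).take L =
            (out ++ [c]).drop ((out ++ [c]).length - L)
      · -- chop: the suffix window is the leftmost match of the whole remaining string
        have hn : (out ++ [c]).length = out.length + 1 := by simp
        set o := out ++ [c] with ho
        set i0 : Nat := o.length - 2 * L with hi0
        have h2L : 2 * L ≤ out.length + 1 := by rw [← hn]; exact hc.1
        -- the second slice already has length L
        have hdropL : (o.drop (o.length - L)).take L = o.drop (o.length - L) :=
          List.take_of_length_le (by simp; omega)
        have hblk : blkEq o i0 L = true := by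
          unfold blkEq
          rw [beq_iff_eq, hi0, show o.length - 2 * L + L = o.length - L by omega, hdropL]
          exact hc.2
        have hstep : step1 L out c = o.take (o.length - L) := by
          unfold step1
          rw [if_pos hc]
        -- the removal result, as A computes it on o ++ rest
        have hfind : findRepA (o ++ rest) L = some i0 := by
          refine findRepA_some L (o ++ rest) i0 (by simp; omega) ?_ ?_
          · rwa [blkEq_append o rest i0 L (by omega)]
          · intro j hj
            have hjb : j + 2 * L ≤ out.length := by omega
            rw [blkEq_append o rest j L (by omega), ho,
              blkEq_append out [c] j L hjb]
            exact h j hjb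
        have hrem : (o ++ rest).take i0 ++ (o ++ rest).drop (i0 + L) =
            o.take (o.length - L) ++ rest := by
          rw [List.take_append_of_le_length (by omega),
            List.drop_append_of_le_length (by omega),
            show o.length - L = i0 + L by omega, List.take_add, ← List.append_assoc]
          congr 2
          rw [hc.2, show o.length - L = i0 + L by omega]
        have hcleanchop : ∀ i, i + 2 * L ≤ (o.take (o.length - L)).length →
            blkEq (o.take (o.length - L)) i L = false := by
          intro i hi
          simp at hi
          have hfit : i + 2 * L ≤ out.length := by omega
          rw [blkEq_take _ _ _ _ (by omega), ho, blkEq_append out [c] i L hfit]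
          exact h i hfit
        rw [hstep, sim1 L hL rest _ hcleanchop, hout, fix1_some hL hfind, hrem]
      · -- no chop: the stack stays clean
        have hstep : step1 L out c = out ++ [c] := by
          unfold step1
          rw [if_neg hc]
        have hclean : ∀ i, i + 2 * L ≤ (out ++ [c]).length →
            blkEq (out ++ [c]) i L = false := by
          intro i hi
          simp at hi
          by_cases hfit : i + 2 * L ≤ out.length
          · rw [blkEq_append out [c] i L hfit]; exact h i hfit
          · -- i is the suffix window; its comparison is exactly the rejected condition
            have hieq : i = (out ++ [c]).length - 2 * L := by simp; omega
            have hdropL : ((out ++ [c]).drop ((out ++ [c]).length - L)).take L =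
                (out ++ [c]).drop ((out ++ [c]).length - L) :=
              List.take_of_length_le (by simp; omega)
            by_contra hb
            rw [Bool.not_eq_false] at hb
            unfold blkEq at hb
            rw [beq_iff_eq, hieq,
              show (out ++ [c]).length - 2 * L + L = (out ++ [c]).length - L by simp; omega,
              hdropL] at hb
            exact hc ⟨by simp; omega, hb⟩
        rw [hstep, sim1 L hL rest _ hclean, hout]

theorem squash1_eq_fix1 (L : Nat) (hL : 0 < L) (l : List Char) : squash1 L l = fix1 L l := by
  have := sim1 L hL l [] (by intro i hi; simp at hi; omega)
  simpa [squash1] using this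

theorem sim2 (L : Nat) (hL : 0 < L) : ∀ (rest out : List Char),
    (∀ i, i + 2 * L + 1 ≤ out.length → pncEq out i L = false) →
    List.foldl (step2 L) out rest = fix2 L (out ++ rest)
  | [], out, h => by
      simpa using (fix2_none (findPncA_none L out h)).symm
  | c :: rest, out, h => by
      rw [List.foldl_cons]
      have hout : out ++ c :: rest = (out ++ [c]) ++ rest := by simp
      by_cases hc : 2 * L + 1 ≤ (out ++ [c]).length ∧
          (match (out ++ [c])[(out ++ [c]).length - (L + 1)]? with
           | some p => pvPunc.contains p
           | none => false) = true ∧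
          ((out ++ [c]).drop ((out ++ [c]).length - (2 * L + 1))).take L =
            (out ++ [c]).drop ((out ++ [c]).length - L)
      · have hn : (out ++ [c]).length = out.length + 1 := by simp
        set o := out ++ [c] with ho
        set i0 : Nat := o.length - (2 * L + 1) with hi0
        have h2L : 2 * L + 1 ≤ out.length + 1 := by rw [← hn]; exact hc.1
        have hdropL : (o.drop (o.length - L)).take L = o.drop (o.length - L) :=
          List.take_of_length_le (by simp; omega)
        have hpnc : pncEq o i0 L = true := by
          unfold pncEq
          rw [show i0 + L = o.length - (L + 1) by omega]
          rw [hc.2.1]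
          simp only [Bool.true_and]
          rw [beq_iff_eq, show o.length - (L + 1) + 1 = o.length - L by omega, hdropL]
          exact hc.2.2
        have hstep : step2 L out c = o.take (o.length - (L + 1)) := by
          unfold step2
          rw [if_pos hc]
        have hfind : findPncA (o ++ rest) L = some i0 := by
          refine findPncA_some L (o ++ rest) i0 (by simp; omega) ?_ ?_
          · rwa [pncEq_append o rest i0 L (by omega)]
          · intro j hj
            have hjb : j + 2 * L + 1 ≤ out.length := by omega
            rw [pncEq_append o rest j L (by omega), ho,
              pncEq_append out [c] j L hjb]
            exact h j hjb
        have hrem : (o ++ rest).take i0 ++ (o ++ rest).drop (i0 + L + 1) =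
            o.take (o.length - (L + 1)) ++ rest := by
          rw [List.take_append_of_le_length (by omega),
            List.drop_append_of_le_length (by omega),
            show o.length - (L + 1) = i0 + L by omega, List.take_add, ← List.append_assoc]
          congr 2
          rw [hc.2.2, show o.length - L = i0 + L + 1 by omega]
        have hcleanchop : ∀ i, i + 2 * L + 1 ≤ (o.take (o.length - (L + 1))).length →
            pncEq (o.take (o.length - (L + 1))) i L = false := by
          intro i hi
          simp at hi
          have hfit : i + 2 * L + 1 ≤ out.length := by omega
          rw [pncEq_take _ _ _ _ (by omega), ho, pncEq_append out [c] i L hfit]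
          exact h i hfit
        rw [hstep, sim2 L hL rest _ hcleanchop, hout, fix2_some hL hfind, hrem]
      · have hstep : step2 L out c = out ++ [c] := by
          unfold step2
          rw [if_neg hc]
        have hclean : ∀ i, i + 2 * L + 1 ≤ (out ++ [c]).length →
            pncEq (out ++ [c]) i L = false := by
          intro i hi
          simp at hi
          by_cases hfit : i + 2 * L + 1 ≤ out.length
          · rw [pncEq_append out [c] i L hfit]; exact h i hfit
          · have hieq : i = (out ++ [c]).length - (2 * L + 1) := by simp; omega
            have hdropL : ((out ++ [c]).drop ((out ++ [c]).length - L)).take L =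
                (out ++ [c]).drop ((out ++ [c]).length - L) :=
              List.take_of_length_le (by simp; omega)
            by_contra hb
            rw [Bool.not_eq_false] at hb
            unfold pncEq at hb
            rw [Bool.and_eq_true] at hb
            rw [hieq, show (out ++ [c]).length - (2 * L + 1) + L =
                  (out ++ [c]).length - (L + 1) by simp; omega] at hb
            have hbeq := hb.2
            rw [beq_iff_eq,
              show (out ++ [c]).length - (L + 1) + 1 = (out ++ [c]).length - L by simp; omega,
              hdropL] at hbeq
            exact hc ⟨by simp only [List.length_append, List.length_cons]; omega, hb.1, hbeq⟩
        rw [hstep, sim2 L hL rest _ hclean, hout]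

theorem squash2_eq_fix2 (L : Nat) (hL : 0 < L) (l : List Char) : squash2 L l = fix2 L l := by
  have := sim2 L hL l [] (by intro i hi; simp at hi)
  simpa [squash2] using this

-- ===== VERDICT (by name: the statement is the Claim_ definition above) =====
theorem remove_rep_spec : Claim_equal_remove_rep := by
  intro sent _
  unfold Spec_remove_rep remove_rep remove_rep_alt
  rw [phase1A_fix 4 _ (by omega), phase1A_fix 3 _ (by omega), phase1A_fix 2 _ (by omega)]
  norm_num [phase1A_one]
  rw [phase2A_fix 6 _ (by omega), phase2A_fix 5 _ (by omega), phase2A_fix 4 _ (by omega),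
    phase2A_fix 3 _ (by omega), phase2A_fix 2 _ (by omega), phase2A_fix 1 _ (by omega)]
  norm_num [phase2A_zero]
  rw [squash1_eq_fix1 4 (by omega), squash1_eq_fix1 3 (by omega), squash1_eq_fix1 2 (by omega),
    squash2_eq_fix2 6 (by omega), squash2_eq_fix2 5 (by omega), squash2_eq_fix2 4 (by omega),
    squash2_eq_fix2 3 (by omega), squash2_eq_fix2 2 (by omega), squash2_eq_fix2 1 (by omega)]
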